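-- pv_equiv track=rewrite | github.com/Marthijs-Berfelo/R2R | py/core/main/services/management_service.py | _process_relationships
-- ===== SOURCE A (Python) =====
-- from collections import defaultdict
-- from typing import Any, BinaryIO, Dict, Optional, Tuple, Union
--
-- def _process_relationships(
--     relationships: list[Tuple[str, str, str]]
-- ) -> Tuple[Dict[str, list[str]], Dict[str, Dict[str, list[str]]]]:
--     graph = defaultdict(list)
--     grouped: Dict[str, Dict[str, list[str]]] = defaultdict(
--         lambda: defaultdict(list)
--     )
--     for subject, relation, obj in relationships:
--         graph[subject].append(obj)
--         grouped[subject][relation].append(obj)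
--         if obj not in graph:
--             graph[obj] = []
--     return dict(graph), dict(grouped)
-- ===== SOURCE B (Python) =====
-- def _process_relationships(relationships):
--     # Declarative group-by: compute the ordered distinct key lists first, then
--     # build each value by a per-key filter comprehension (no dict accumulation).
--     nodes = list(dict.fromkeys(n for s, _, o in relationships for n in (s, o)))
--     graph = {n: [o for s, _, o in relationships if s == n] for n in nodes}
--     subjects = list(dict.fromkeys(s for s, _, _ in relationships))
--     grouped = {
--         s: {r: [o for s2, r2, o in relationships if s2 == s and r2 == r]
--             for r in dict.fromkeys(r2 for s2, r2, _ in relationships if s2 == s)}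
--         for s in subjects
--     }
--     return graph, grouped
-- ===== Notes on version B (the rewrite author's own statement) =====
-- stated objective: alternative
-- what changed: Replaces A's single-pass incremental dict accumulation (defaultdicts with per-triple appends and an 'if obj not in graph' guard) by a declarative group-by: the ordered distinct key lists (nodes, subjects, per-subject relations) are computed first with dict.fromkeys, and every value list is built by a per-key filter comprehension over the triples; no dict is ever mutated.
import Mathlib
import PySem

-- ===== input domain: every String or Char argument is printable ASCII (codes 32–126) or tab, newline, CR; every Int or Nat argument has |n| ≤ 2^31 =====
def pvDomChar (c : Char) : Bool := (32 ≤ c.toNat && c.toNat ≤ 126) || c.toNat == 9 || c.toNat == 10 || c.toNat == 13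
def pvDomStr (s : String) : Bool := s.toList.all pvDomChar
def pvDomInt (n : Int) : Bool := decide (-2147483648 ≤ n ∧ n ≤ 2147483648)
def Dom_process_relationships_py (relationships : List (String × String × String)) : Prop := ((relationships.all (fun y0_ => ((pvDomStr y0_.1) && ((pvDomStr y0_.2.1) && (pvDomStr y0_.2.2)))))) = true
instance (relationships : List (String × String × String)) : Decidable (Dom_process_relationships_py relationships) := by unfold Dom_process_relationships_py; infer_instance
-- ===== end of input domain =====

-- B replaces A's single-pass dict accumulation by a declarative group-by: ordered distinct
-- key lists first, then each value built by a per-key filter (objective: alternative).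

-- ===== PORT A =====
-- graph[subject].append(obj)  (defaultdict(list));  then: if obj not in graph: graph[obj] = []
def pvGraphStepA (g : PySem.Dict String (List String)) (t : String × String × String) :
    PySem.Dict String (List String) :=
  let g1 := g.insert t.1 (g.getD t.1 [] ++ [t.2.2])
  if g1.contains t.2.2 then g1 else g1.insert t.2.2 []

-- grouped[subject][relation].append(obj)  (defaultdict(lambda: defaultdict(list)))
def pvGroupStepA (d : PySem.Dict String (PySem.Dict String (List String)))
    (t : String × String × String) : PySem.Dict String (PySem.Dict String (List String)) :=
  let inner := d.getD t.1 PySem.Dict.empty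
  d.insert t.1 (inner.insert t.2.1 (inner.getD t.2.1 [] ++ [t.2.2]))

def process_relationships_py (relationships : List (String × String × String)) : (List (String × List String)) × (List (String × List (String × List String))) :=
  let st := relationships.foldl
    (fun st t => (pvGraphStepA st.1 t, pvGroupStepA st.2 t))
    (PySem.Dict.empty, PySem.Dict.empty)
  (st.1.items, st.2.items.map (fun p => (p.1, p.2.items)))

-- ===== PORT B =====
def process_relationships_py_alt (relationships : List (String × String × String)) : (List (String × List String)) × (List (String × List (String × List String))) :=
  -- nodes = list(dict.fromkeys(n for s, _, o in relationships for n in (s, o)))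
  let nodes := PySem.List.dedup (relationships.flatMap (fun t => [t.1, t.2.2]))
  -- graph = {n: [o for s, _, o in relationships if s == n] for n in nodes}
  let graph := nodes.map (fun n =>
    (n, (relationships.filter (fun t => t.1 == n)).map (fun t => t.2.2)))
  -- subjects = list(dict.fromkeys(s for s, _, _ in relationships))
  let subjects := PySem.List.dedup (relationships.map (fun t => t.1))
  -- grouped = {s: {r: [o ...] for r in dict.fromkeys(...)} for s in subjects}
  let grouped := subjects.map (fun s =>
    (s, (PySem.List.dedup ((relationships.filter (fun t => t.1 == s)).map (fun t => t.2.1))).map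
        (fun r => (r, (relationships.filter (fun t => t.1 == s && t.2.1 == r)).map (fun t => t.2.2)))))
  (graph, grouped)

-- ===== PRECONDITION & SPEC =====
def Spec_process_relationships_py (relationships : List (String × String × String)) (out : (List (String × List String)) × (List (String × List (String × List String)))) : Prop := out = process_relationships_py_alt relationships
instance (relationships : List (String × String × String)) (out : (List (String × List String)) × (List (String × List (String × List String)))) : Decidable (Spec_process_relationships_py relationships out) := by unfold Spec_process_relationships_py; infer_instance

-- ===== CLAIM =====
def Claim_equal_process_relationships_py : Prop := ∀ (relationships : List (String × String × String)), Dom_process_relationships_py relationships → Spec_process_relationships_py relationships (process_relationships_py relationships)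

-- ===== LEMMAS AND PROOFS =====

-- the conditional "if obj not in graph: graph[obj] = []" never changes any lookup
lemma pv_guard_getD (g : PySem.Dict String (List String)) (o c : String) :
    (if g.contains o then g else g.insert o []).getD c [] = g.getD c [] := by
  split_ifs with h
  · rfl
  · rw [PySem.Dict.getD_insert]
    split_ifs with hc
    · subst hc
      exact (PySem.Dict.getD_of_not_contains g [] (by simpa using h)).symm
    · rfl

-- every lookup in A's graph dict is the per-subject filter of the processed triples
lemma pv_graph_getD (l : List (String × String × String))
    (d : PySem.Dict String (List String)) (c : String) :
    (l.foldl pvGraphStepA d).getD c [] =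
      d.getD c [] ++ (l.filter (fun t => t.1 == c)).map (fun t => t.2.2) := by
  induction l generalizing d with
  | nil => simp
  | cons t l ih =>
    obtain ⟨s, r, o⟩ := t
    have hdef : pvGraphStepA d (s, r, o) =
        (if (d.insert s (d.getD s [] ++ [o])).contains o
         then d.insert s (d.getD s [] ++ [o])
         else (d.insert s (d.getD s [] ++ [o])).insert o []) := rfl
    have hstep : (pvGraphStepA d (s, r, o)).getD c [] =
        if c = s then d.getD s [] ++ [o] else d.getD c [] := by
      rw [hdef, pv_guard_getD, PySem.Dict.getD_insert]
    rw [List.foldl_cons, ih, hstep, List.filter_cons]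
    by_cases hc : c = s
    · subst hc; simp
    · simp [hc, Ne.symm hc]

-- one A-step adds subject then object to the key set
lemma pv_graph_step_keys (d : PySem.Dict String (List String)) (t : String × String × String) :
    (pvGraphStepA d t).keys = PySem.Set.add (PySem.Set.add d.keys t.1) t.2.2 := by
  have hdef : pvGraphStepA d t =
      (if (d.insert t.1 (d.getD t.1 [] ++ [t.2.2])).contains t.2.2
       then d.insert t.1 (d.getD t.1 [] ++ [t.2.2])
       else (d.insert t.1 (d.getD t.1 [] ++ [t.2.2])).insert t.2.2 []) := rfl
  have h1 : (d.insert t.1 (d.getD t.1 [] ++ [t.2.2])).keys = PySem.Set.add d.keys t.1 := by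
    rw [PySem.Set.add_eq_ite]
    by_cases h : d.contains t.1
    · rw [PySem.Dict.keys_insert_of_contains _ _ h,
        if_pos ((PySem.Dict.contains_iff_mem_keys d t.1).mp h)]
    · rw [PySem.Dict.keys_insert_of_not_contains _ _ (by simpa using h),
        if_neg (fun hm => h ((PySem.Dict.contains_iff_mem_keys d t.1).mpr hm))]
  rw [hdef, PySem.Set.add_eq_ite _ t.2.2, ← h1]
  by_cases h : (d.insert t.1 (d.getD t.1 [] ++ [t.2.2])).contains t.2.2
  · rw [if_pos h, if_pos ((PySem.Dict.contains_iff_mem_keys _ _).mp h)]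
  · rw [if_neg h,
      if_neg (fun hm => h ((PySem.Dict.contains_iff_mem_keys _ _).mpr hm)),
      PySem.Dict.keys_insert_of_not_contains _ _ (by simpa using h)]

-- A's graph keys are the subjects and objects in first-appearance order
lemma pv_graph_keys (l : List (String × String × String))
    (d : PySem.Dict String (List String)) :
    (l.foldl pvGraphStepA d).keys =
      PySem.Set.update d.keys (l.flatMap (fun t => [t.1, t.2.2])) := by
  induction l generalizing d with
  | nil => rfl
  | cons t l ih =>
    rw [List.foldl_cons, ih, pv_graph_step_keys, List.flatMap_cons, List.cons_append,
      List.singleton_append, PySem.Set.update_cons, PySem.Set.update_cons]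

-- A's grouped keys are the subjects in first-appearance order
lemma pv_group_keys (l : List (String × String × String))
    (d : PySem.Dict String (PySem.Dict String (List String))) :
    (l.foldl pvGroupStepA d).keys = PySem.Set.update d.keys (l.map (fun t => t.1)) :=
  PySem.Dict.keys_foldl_insert_key l (fun t => t.1)
    (fun d t => (d.getD t.1 PySem.Dict.empty).insert t.2.1
      ((d.getD t.1 PySem.Dict.empty).getD t.2.1 [] ++ [t.2.2])) d

lemma pv_group_nodup (l : List (String × String × String))
    (d : PySem.Dict String (PySem.Dict String (List String))) (h : d.keys.Nodup) :
    (l.foldl pvGroupStepA d).keys.Nodup :=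
  PySem.Dict.nodup_keys_foldl_insert_key l (fun t => t.1)
    (fun d t => (d.getD t.1 PySem.Dict.empty).insert t.2.1
      ((d.getD t.1 PySem.Dict.empty).getD t.2.1 [] ++ [t.2.2])) d h

-- the inner (relation → objects) fold: keys and nodup, by the cited library lemmas
lemma pv_inner_keys (pairs : List (String × String)) (d : PySem.Dict String (List String)) :
    (pairs.foldl (fun inner p => inner.modify p.1 [] (fun x => x ++ [p.2])) d).keys =
      PySem.Set.update d.keys (pairs.map (fun p => p.1)) :=
  PySem.Dict.keys_foldl_modify_key pairs (fun p => p.1) [] (fun _ p => fun x => x ++ [p.2]) d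

lemma pv_inner_nodup (pairs : List (String × String)) (d : PySem.Dict String (List String))
    (h : d.keys.Nodup) :
    (pairs.foldl (fun inner p => inner.modify p.1 [] (fun x => x ++ [p.2])) d).keys.Nodup :=
  PySem.Dict.nodup_keys_foldl_modify_key pairs (fun p => p.1) [] (fun _ p => fun x => x ++ [p.2]) d h

-- every lookup in A's grouped dict is the fold of the per-subject (relation, obj) pairs
lemma pv_group_getD (l : List (String × String × String))
    (d : PySem.Dict String (PySem.Dict String (List String))) (s : String) :
    (l.foldl pvGroupStepA d).getD s PySem.Dict.empty =
      ((l.filter (fun t => t.1 == s)).map (fun t => (t.2.1, t.2.2))).foldl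
        (fun inner p => inner.modify p.1 [] (fun x => x ++ [p.2]))
        (d.getD s PySem.Dict.empty) := by
  induction l generalizing d with
  | nil => rfl
  | cons t l ih =>
    obtain ⟨ts, tr, ob⟩ := t
    have hdef : pvGroupStepA d (ts, tr, ob) =
        d.insert ts ((d.getD ts PySem.Dict.empty).insert tr
          ((d.getD ts PySem.Dict.empty).getD tr [] ++ [ob])) := rfl
    rw [List.foldl_cons, ih, List.filter_cons]
    by_cases hc : ts = s
    · subst hc
      simp only [beq_self_eq_true, if_true, List.map_cons, List.foldl_cons]
      rw [hdef, PySem.Dict.getD_insert, if_pos rfl]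
      rfl
    · rw [if_neg (by simpa using hc), hdef, PySem.Dict.getD_insert,
        if_neg (Ne.symm hc)]

-- ===== VERDICT =====
theorem process_relationships_py_spec : Claim_equal_process_relationships_py := by
  intro relationships _
  unfold Spec_process_relationships_py process_relationships_py process_relationships_py_alt
  have hded : @PySem.List.dedup String _ = PySem.Set.ofList := rfl
  simp only [PySem.List.foldl_prod_mk, Prod.mk.injEq, hded]
  constructor
  · -- graph component
    have hnd : (relationships.foldl pvGraphStepA PySem.Dict.empty).keys.Nodup := by
      rw [pv_graph_keys, PySem.Dict.keys_empty]
      exact PySem.Set.nodup_update _ _ List.nodup_nil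
    rw [PySem.Dict.items_eq_map_keys _ hnd [], pv_graph_keys, PySem.Dict.keys_empty,
      PySem.Set.update_nil_left]
    apply List.map_congr_left
    intro n _
    rw [pv_graph_getD, PySem.Dict.getD_empty, List.nil_append]
  · -- grouped component
    have hnd : (relationships.foldl pvGroupStepA PySem.Dict.empty).keys.Nodup :=
      pv_group_nodup relationships PySem.Dict.empty PySem.Dict.nodup_keys_empty
    rw [PySem.Dict.items_eq_map_keys _ hnd PySem.Dict.empty, pv_group_keys,
      PySem.Dict.keys_empty, PySem.Set.update_nil_left, List.map_map]
    apply List.map_congr_left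
    intro s _
    simp only [Function.comp_apply]
    rw [pv_group_getD, PySem.Dict.getD_empty]
    have hndi := pv_inner_nodup
      ((relationships.filter (fun t => t.1 == s)).map (fun t => (t.2.1, t.2.2)))
      PySem.Dict.empty PySem.Dict.nodup_keys_empty
    rw [PySem.Dict.items_eq_map_keys _ hndi [], pv_inner_keys, PySem.Dict.keys_empty,
      PySem.Set.update_nil_left, List.map_map]
    refine congrArg₂ Prod.mk rfl ?_
    apply List.map_congr_left
    intro r _
    rw [PySem.Dict.getD_foldl_modify_append, PySem.Dict.getD_empty, List.nil_append,
      List.filter_map, List.filter_filter, List.map_map]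
    refine congrArg₂ Prod.mk rfl ?_
    refine congrArg _ (List.filter_congr ?_)
    intro t _
    simp [Function.comp, Bool.and_comm]
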